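-- pv_equiv track=rewrite | github.com/RedSoniaPanda/coding_exercises | group_anagrams/group_anagrams_v1.py | do_add_word_list_to_final
-- ===== SOURCE A (Python) =====
-- from typing import List, Dict
--
-- def word_count(w: List[str]) -> Dict[str, int]:
--     word_cnt = {}
--     for word in w:
--         if word not in word_cnt.keys():
--             word_cnt[word] = 1
--         else:
--             word_cnt[word] += 1
--     return word_cnt
--
-- def do_add_word_list_to_final(
--     all_words: List[List[str]],
--     new_words: List[str]
-- ) -> bool:
--     for w in all_words:
--         w_word_cnt = word_count(w)
--         new_words_cnt = word_count(new_words)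
--         if w_word_cnt == new_words_cnt:
--             return False
--     return True
-- ===== SOURCE B (Python) =====
-- def do_add_word_list_to_final(all_words, new_words):
--     key = sorted(new_words)
--     return not any(sorted(w) == key for w in all_words)
-- ===== Notes on version B (the rewrite author's own statement) =====
-- stated objective: simpler
-- what changed: Replaces the per-group count-dictionary construction and dict comparison with a single precomputed sorted key compared against sorted(w) via any(), dropping the word_count helper entirely.
import Mathlib
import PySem

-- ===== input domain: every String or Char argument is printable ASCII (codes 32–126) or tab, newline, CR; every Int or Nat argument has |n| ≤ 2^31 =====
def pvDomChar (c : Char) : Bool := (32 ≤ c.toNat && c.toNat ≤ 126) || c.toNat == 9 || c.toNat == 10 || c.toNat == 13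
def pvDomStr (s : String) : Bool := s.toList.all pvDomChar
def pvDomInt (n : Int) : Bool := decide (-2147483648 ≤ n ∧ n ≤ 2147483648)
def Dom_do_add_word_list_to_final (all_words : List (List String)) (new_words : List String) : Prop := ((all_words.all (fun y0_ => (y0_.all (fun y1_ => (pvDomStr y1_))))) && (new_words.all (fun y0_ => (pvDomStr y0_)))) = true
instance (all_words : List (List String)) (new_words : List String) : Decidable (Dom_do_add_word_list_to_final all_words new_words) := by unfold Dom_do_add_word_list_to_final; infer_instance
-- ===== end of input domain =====

-- B replaces per-group count-dictionaries compared by dict == with one precomputed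
-- sorted key compared against sorted(w); simpler, no word_count helper.

-- ===== PORT A =====
-- word_count: the counting loop with its two branches
def wordCount (w : List String) : PySem.Dict String Int :=
  w.foldl (fun word_cnt word =>
    if word_cnt.contains word = false then word_cnt.insert word 1
    else word_cnt.insert word (word_cnt.getD word 0 + 1)) PySem.Dict.empty

-- Python's dict == : same key set and same value at each key (order ignored); exact
def pyDictEq (d1 d2 : PySem.Dict String Int) : Bool :=
  d1.keys.all (fun k => d2.get? k == d1.get? k) && d2.keys.all (fun k => d1.get? k == d2.get? k)

def do_add_word_list_to_final (all_words : List (List String)) (new_words : List String) : Bool :=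
  match all_words with
  | [] => true
  | w :: rest =>
    if pyDictEq (wordCount w) (wordCount new_words) then false
    else do_add_word_list_to_final rest new_words

-- ===== PORT B =====
def do_add_word_list_to_final_alt (all_words : List (List String)) (new_words : List String) : Bool :=
  let key := PySem.List.sorted new_words (fun x => x) false
  !(all_words.any (fun w => PySem.List.sorted w (fun x => x) false == key))

-- ===== PRECONDITION & SPEC =====
def Spec_do_add_word_list_to_final (all_words : List (List String)) (new_words : List String) (out : Bool) : Prop := out = do_add_word_list_to_final_alt all_words new_words
instance (all_words : List (List String)) (new_words : List String) (out : Bool) : Decidable (Spec_do_add_word_list_to_final all_words new_words out) := by unfold Spec_do_add_word_list_to_final; infer_instance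

-- ===== CLAIM (what is proved, stated in full; the proofs are below) =====
def Claim_equal_do_add_word_list_to_final : Prop := ∀ (all_words : List (List String)) (new_words : List String), Dom_do_add_word_list_to_final all_words new_words → Spec_do_add_word_list_to_final all_words new_words (do_add_word_list_to_final all_words new_words)

-- ===== LEMMAS AND PROOFS =====

-- word_count builds exactly Counter(xs)
theorem wordCount_eq_counter (xs : List String) : wordCount xs = PySem.Dict.counter xs := by
  rw [← PySem.Dict.foldl_insert_getD_add_one_eq_counter]
  unfold wordCount
  congr 1
  funext d x
  by_cases h : d.contains x = false
  · simp [h, PySem.Dict.getD_of_not_contains d 0 h]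
  · simp [h]

theorem get?_counter (xs : List String) (v : String) :
    (PySem.Dict.counter xs).get? v = if v ∈ xs then some (xs.count v : Int) else none := by
  by_cases h : v ∈ xs
  · have hc : (PySem.Dict.counter xs).contains v = true := by
      rw [PySem.Dict.contains_iff_mem_keys, PySem.Dict.keys_counter]
      exact (PySem.Set.mem_ofList xs v).mpr h
    have hs : ((PySem.Dict.counter xs).get? v).isSome := by
      rw [← PySem.Dict.contains_eq_isSome_get?]; exact hc
    obtain ⟨w, hw⟩ := Option.isSome_iff_exists.mp hs
    have := PySem.Dict.getD_of_get?_eq_some (d := PySem.Dict.counter xs) (d0 := (0:Int)) hw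
    rw [PySem.Dict.getD_counter] at this
    simp [h, hw, ← this]
  · have hc : (PySem.Dict.counter xs).contains v = false := by
      rw [PySem.Dict.contains_eq_decide_mem_keys, PySem.Dict.keys_counter]
      simp [PySem.Set.mem_ofList, h]
    have := (PySem.Dict.get?_eq_none_iff_contains (d := PySem.Dict.counter xs) (k := v)).mpr hc
    simp [h, this]

theorem pyDictEq_counter_iff (xs ys : List String) :
    pyDictEq (PySem.Dict.counter xs) (PySem.Dict.counter ys) = true ↔ xs.Perm ys := by
  rw [List.perm_iff_count]
  unfold pyDictEq
  simp only [Bool.and_eq_true, List.all_eq_true, PySem.Dict.keys_counter, beq_iff_eq]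
  constructor
  · rintro ⟨h1, h2⟩ v
    by_cases hx : v ∈ xs
    · have := h1 v ((PySem.Set.mem_ofList xs v).mpr hx)
      rw [get?_counter, get?_counter] at this
      by_cases hy : v ∈ ys
      · simp [hx, hy] at this; omega
      · simp [hx, hy] at this
    · by_cases hy : v ∈ ys
      · have := h2 v ((PySem.Set.mem_ofList ys v).mpr hy)
        rw [get?_counter, get?_counter] at this
        simp [hx, hy] at this
      · simp [List.count_eq_zero_of_not_mem hx, List.count_eq_zero_of_not_mem hy]
  · intro h
    have key : ∀ v, (PySem.Dict.counter ys).get? v = (PySem.Dict.counter xs).get? v := by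
      intro v
      rw [get?_counter, get?_counter, h v]
      have hmem : v ∈ xs ↔ v ∈ ys := by
        rw [← List.count_pos_iff, ← List.count_pos_iff, h v]
      by_cases hx : v ∈ xs
      · simp [hx, hmem.mp hx]
      · have hy : v ∉ ys := fun hv => hx (hmem.mpr hv)
        simp [hx, hy]
    exact ⟨fun v _ => key v, fun v _ => (key v).symm⟩

-- per-group agreement: dict == of counts ⟺ sorted lists equal
theorem per_group (w nw : List String) :
    pyDictEq (wordCount w) (wordCount nw)
      = (PySem.List.sorted w (fun x => x) false == PySem.List.sorted nw (fun x => x) false) := by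
  rw [wordCount_eq_counter, wordCount_eq_counter]
  by_cases h : w.Perm nw
  · simp [(pyDictEq_counter_iff w nw).mpr h,
      (PySem.List.sorted_id_eq_sorted_id_iff_perm (xs := w) (ys := nw)).mpr h]
  · have h1 : pyDictEq (PySem.Dict.counter w) (PySem.Dict.counter nw) = false := by
      by_contra hc
      exact h ((pyDictEq_counter_iff w nw).mp (by revert hc; cases pyDictEq (PySem.Dict.counter w) (PySem.Dict.counter nw) <;> simp))
    have h2 : PySem.List.sorted w (fun x => x) false ≠ PySem.List.sorted nw (fun x => x) false :=
      fun hc => h ((PySem.List.sorted_id_eq_sorted_id_iff_perm w nw).mp hc)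
    simp [h1, h2]

-- ===== VERDICT (by name: the statement is the Claim_ definition above) =====
theorem do_add_word_list_to_final_spec : Claim_equal_do_add_word_list_to_final := by
  intro all_words new_words hdom
  clear hdom
  unfold Spec_do_add_word_list_to_final
  induction all_words with
  | nil => simp [do_add_word_list_to_final, do_add_word_list_to_final_alt]
  | cons w rest ih =>
    rw [do_add_word_list_to_final, per_group]
    by_cases h : (PySem.List.sorted w (fun x => x) false) = PySem.List.sorted new_words (fun x => x) false
    · simp [do_add_word_list_to_final_alt, h]
    · simp only [beq_iff_eq, if_neg h]
      rw [ih]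
      simp [do_add_word_list_to_final_alt, h]
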